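-- pv_equiv track=rewrite | github.com/jonasort/MEA_analysis | modified_common_script/from_pkl_to_overviewtable_incl_isi_bursts_20240416.py | find_binned_spikes
-- ===== SOURCE A (Python) =====
-- def find_binned_spikes(data, bins):
--     '''
--     Parameters
--     ----------
--     data : for network spike binning --> expects an 1D array with all spikes detected for the network
--     bins : list of tuples of expected bins
--
--     Returns
--     -------
--     binlist : list of lists where lists contain all spikes for the respective bins
--
--     '''
--     binlist =[]
--     binspike =[]
--     for i in range(0, len(bins)):
--         binspike = []
--         for a in data:
--             if bins[i][0] <= a < bins[i][1]:
--                 binspike.append(a)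
--         binlist.append(binspike)
--
--     return binlist
-- ===== SOURCE B (Python) =====
-- def find_binned_spikes(data, bins):
--     # Sort (index, spike) pairs by spike value once; each bin's contents are then a
--     # CONTIGUOUS segment of the sorted list, found by advancing a cursor past values
--     # below the bin's lower edge and collecting values below its upper edge; the
--     # segment is re-sorted by original index to restore data order.
--     pairs = sorted(enumerate(data), key=lambda p: p[1])
--     n = len(pairs)
--     binlist = []
--     for b in bins:
--         i = 0
--         while i < n and pairs[i][1] < b[0]:
--             i += 1
--         seg = []
--         while i < n and pairs[i][1] < b[1]:
--             seg.append(pairs[i])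
--             i += 1
--         seg.sort(key=lambda p: p[0])
--         binlist.append([a for _, a in seg])
--     return binlist
-- ===== Notes on version B (the rewrite author's own statement) =====
-- stated objective: alternative
-- what changed: B sorts (index, spike) pairs by value once, extracts each bin as a contiguous cursor-advance segment of the sorted list instead of re-scanning all data per bin, and re-sorts the segment by original index to restore data order.
import Mathlib
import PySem

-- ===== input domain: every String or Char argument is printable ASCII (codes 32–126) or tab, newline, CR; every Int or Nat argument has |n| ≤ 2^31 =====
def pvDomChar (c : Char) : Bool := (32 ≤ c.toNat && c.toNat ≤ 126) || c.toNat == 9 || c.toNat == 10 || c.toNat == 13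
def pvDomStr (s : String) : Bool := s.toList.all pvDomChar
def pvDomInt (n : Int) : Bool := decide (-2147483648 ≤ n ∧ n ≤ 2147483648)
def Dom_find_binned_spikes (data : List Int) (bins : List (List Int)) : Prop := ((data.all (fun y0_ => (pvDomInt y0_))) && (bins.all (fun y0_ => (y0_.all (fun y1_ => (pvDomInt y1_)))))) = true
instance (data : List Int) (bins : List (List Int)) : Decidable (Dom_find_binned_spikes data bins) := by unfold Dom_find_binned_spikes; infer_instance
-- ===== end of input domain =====

-- B replaces the per-bin rescans of the whole data with one sort of (index, spike) pairs by
-- value, contiguous segment extraction per bin, and a per-segment re-sort by index.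

-- shared condition  bins[i][0] <= a < bins[i][1]  (both Pythons evaluate this comparison)
def pvCond (b : List Int) (a : Int) : Bool :=
  decide (PySem.List.pyGetD b 0 0 ≤ a ∧ a < PySem.List.pyGetD b 1 0)

-- ===== PORT A =====
def find_binned_spikes (data : List Int) (bins : List (List Int)) : List (List Int) :=
  -- for i in range(0, len(bins)): binspike = []; for a in data: …; binlist.append(binspike)
  (PySem.List.pyRange 0 (bins.length : Int) 1).foldl
    (fun binlist i =>
      let binspike := data.foldl
        (fun binspike a =>
          if pvCond (PySem.List.pyGetD bins i []) a then binspike ++ [a] else binspike) []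
      binlist ++ [binspike]) []

-- ===== PORT B =====
-- pairs = sorted(enumerate(data), key=lambda p: p[1])
def pvPairs (data : List Int) : List (Int × Int) :=
  PySem.List.sorted (PySem.List.enumerate data) (fun p => p.2) false

-- while i < n and pairs[i][1] < b[0]: i += 1   (cursor advance = drop the matched prefix)
def pvSkipLt (lo : Int) : List (Int × Int) → List (Int × Int)
  | [] => []
  | p :: rest => if p.2 < lo then pvSkipLt lo rest else p :: rest

-- while i < n and pairs[i][1] < b[1]: seg.append(pairs[i]); i += 1
def pvCollectLt (hi : Int) : List (Int × Int) → List (Int × Int)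
  | [] => []
  | p :: rest => if p.2 < hi then p :: pvCollectLt hi rest else []

def find_binned_spikes_alt (data : List Int) (bins : List (List Int)) : List (List Int) :=
  bins.foldl
    (fun binlist b =>
      binlist ++ [(PySem.List.sorted
          (pvCollectLt (PySem.List.pyGetD b 1 0)
            (pvSkipLt (PySem.List.pyGetD b 0 0) (pvPairs data)))
          (fun p => p.1) false).map (fun p => p.2)])
    []

-- ===== PRECONDITION & SPEC =====
-- Pre_ excludes exactly the inputs on which the Python A raises IndexError: a bin with fewer
-- than two entries reached by the chained comparison (with nonempty data, an empty bin always
-- raises; a one-entry bin raises as soon as some spike is ≥ its single entry).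
def Pre_find_binned_spikes (data : List Int) (bins : List (List Int)) : Prop :=
  ∀ b ∈ bins, data = [] ∨ 2 ≤ b.length ∨
    (b.length = 1 ∧ ∀ a ∈ data, a < PySem.List.pyGetD b 0 0)
instance (data : List Int) (bins : List (List Int)) : Decidable (Pre_find_binned_spikes data bins) := by unfold Pre_find_binned_spikes; infer_instance

def pvWitness_find_binned_spikes : List Int × List (List Int) := ([1, 5, 2], [[0, 3], [3, 6]])

def Spec_find_binned_spikes (data : List Int) (bins : List (List Int)) (out : List (List Int)) : Prop := out = find_binned_spikes_alt data bins
instance (data : List Int) (bins : List (List Int)) (out : List (List Int)) : Decidable (Spec_find_binned_spikes data bins out) := by unfold Spec_find_binned_spikes; infer_instance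

-- ===== CLAIM (what is proved, stated in full; the proofs are below) =====
def Claim_equal_find_binned_spikes : Prop := ∀ (data : List Int) (bins : List (List Int)), Dom_find_binned_spikes data bins → Pre_find_binned_spikes data bins → Spec_find_binned_spikes data bins (find_binned_spikes data bins)

-- ===== LEMMAS AND PROOFS =====

-- A computes each bin's contents as a filter of the data
lemma portA_eq_map_filter (data : List Int) (bins : List (List Int)) :
    find_binned_spikes data bins = bins.map (fun b => data.filter (pvCond b)) := by
  unfold find_binned_spikes
  rw [PySem.List.foldl_append_singleton_eq_map]
  have h : ∀ i, data.foldl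
      (fun binspike a =>
        if pvCond (PySem.List.pyGetD bins i []) a then binspike ++ [a] else binspike) [] =
      data.filter (pvCond (PySem.List.pyGetD bins i [])) := by
    intro i
    simpa using PySem.List.foldl_append_if (pvCond (PySem.List.pyGetD bins i [])) id data []
  simp only [h]
  have hb : (PySem.List.pyRange 0 (bins.length : Int) 1).map
      (fun j => PySem.List.pyGetD bins j []) = bins := by
    simpa [PySem.List.len] using PySem.List.map_pyGetD_pyRange_zero bins ([] : List Int)
  calc (PySem.List.pyRange 0 (bins.length : Int) 1).map
        (fun i => data.filter (pvCond (PySem.List.pyGetD bins i [])))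
      = ((PySem.List.pyRange 0 (bins.length : Int) 1).map
          (fun j => PySem.List.pyGetD bins j [])).map (fun b => data.filter (pvCond b)) := by
        rw [List.map_map]; rfl
    _ = bins.map (fun b => data.filter (pvCond b)) := by rw [hb]

-- on a value-sorted list, the cursor advance drops exactly the pairs below lo
lemma skipLt_eq_filter (lo : Int) (l : List (Int × Int))
    (h : l.Pairwise (fun p q => p.2 ≤ q.2)) :
    pvSkipLt lo l = l.filter (fun p => decide (lo ≤ p.2)) := by
  induction l with
  | nil => rfl
  | cons p rest ih =>
    rcases List.pairwise_cons.mp h with ⟨hhead, htail⟩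
    by_cases hp : p.2 < lo
    · simp [pvSkipLt, hp, ih htail, show ¬ lo ≤ p.2 by omega]
    · have hall : rest.filter (fun q => decide (lo ≤ q.2)) = rest :=
        List.filter_eq_self.mpr (fun q hq => by
          have := hhead q hq; simp; omega)
      simp [pvSkipLt, hp, hall, show lo ≤ p.2 by omega]

-- on a value-sorted list, collection stops exactly at the first pair ≥ hi
lemma collectLt_eq_filter (hi : Int) (l : List (Int × Int))
    (h : l.Pairwise (fun p q => p.2 ≤ q.2)) :
    pvCollectLt hi l = l.filter (fun p => decide (p.2 < hi)) := by
  induction l with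
  | nil => rfl
  | cons p rest ih =>
    rcases List.pairwise_cons.mp h with ⟨hhead, htail⟩
    by_cases hp : p.2 < hi
    · simp [pvCollectLt, hp, ih htail]
    · have hall : rest.filter (fun q => decide (q.2 < hi)) = [] :=
        List.filter_eq_nil_iff.mpr (fun q hq => by
          have := hhead q hq; simp; omega)
      simp [pvCollectLt, hp, hall]

-- projecting the values of a range-filtered enumeration is the range-filter of the data
lemma map_snd_filter_enumerate (lo hi : Int) (data : List Int) (s : Int) :
    ((PySem.List.enumerate data s).filter
        (fun p => decide (lo ≤ p.2 ∧ p.2 < hi))).map (fun p => p.2) =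
      data.filter (fun a => decide (lo ≤ a ∧ a < hi)) := by
  induction data generalizing s with
  | nil => simp [PySem.List.enumerate_nil]
  | cons a rest ih =>
    rw [PySem.List.enumerate_cons]
    by_cases h : lo ≤ a ∧ a < hi
    · rw [List.filter_cons_of_pos (by simpa using h),
          List.filter_cons_of_pos (by simpa using h), List.map_cons, ih]
    · rw [List.filter_cons_of_neg (by simpa using h),
          List.filter_cons_of_neg (by simpa using h), ih]

-- B computes the same map of filters
lemma portB_eq_map_filter (data : List Int) (bins : List (List Int)) :
    find_binned_spikes_alt data bins = bins.map (fun b => data.filter (pvCond b)) := by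
  unfold find_binned_spikes_alt
  rw [PySem.List.foldl_append_singleton_eq_map]
  simp only [List.nil_append]
  apply List.map_congr_left
  intro b _
  set lo := PySem.List.pyGetD b 0 0 with hlo
  set hi := PySem.List.pyGetD b 1 0 with hhi
  have hsorted : (pvPairs data).Pairwise (fun p q : Int × Int => p.2 ≤ q.2) :=
    PySem.List.sorted_pairwise (PySem.List.enumerate data) (fun p => p.2)
  rw [skipLt_eq_filter lo _ hsorted,
      collectLt_eq_filter hi _ (hsorted.filter _), List.filter_filter]
  have hcond : (fun p : Int × Int => decide (p.2 < hi) && decide (lo ≤ p.2)) =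
      fun p : Int × Int => decide (lo ≤ p.2 ∧ p.2 < hi) := by
    funext p; by_cases h1 : lo ≤ p.2 <;> by_cases h2 : p.2 < hi <;> simp [h1, h2]
  rw [hcond]
  have hperm : ((PySem.List.enumerate data).filter
      (fun p => decide (lo ≤ p.2 ∧ p.2 < hi))).Perm
      ((pvPairs data).filter (fun p => decide (lo ≤ p.2 ∧ p.2 < hi))) :=
    ((PySem.List.sorted_perm (PySem.List.enumerate data) (fun p : Int × Int => p.2)
        false).filter _).symm
  have hpw : ((PySem.List.enumerate data).filter
      (fun p => decide (lo ≤ p.2 ∧ p.2 < hi))).Pairwise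
      (fun p q : Int × Int => p.1 < q.1) :=
    (PySem.List.pairwise_lt_enumerate data 0).filter _
  rw [PySem.List.sorted_eq_of_perm_of_pairwise_lt _ _ (fun p : Int × Int => p.1) hperm hpw,
      map_snd_filter_enumerate]
  rfl

-- ===== VERDICT (by name: the statement is the Claim_ definition above) =====
theorem find_binned_spikes_spec : Claim_equal_find_binned_spikes := by
  intro data bins _ _
  unfold Spec_find_binned_spikes
  rw [portA_eq_map_filter, portB_eq_map_filter]
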